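-- pv_equiv track=rewrite | github.com/Jjiggu/Programmers | 프로그래머스/1/82612. 부족한 금액 계산하기/부족한 금액 계산하기.py | solution
-- ===== SOURCE A (Python) =====
-- def solution(price, money, count):
--     answer = -1
--     result = 0
--
--     for i in range(1, count + 1):
--         result += i * price
--
--     if result > money:
--         return result - money
--     else:
--         return 0
-- ===== SOURCE B (Python) =====
-- def solution(price, money, count):
--     n = max(count, 0)
--     tickets = n * (n + 1) // 2
--     return max(price * tickets - money, 0)
-- ===== Notes on version B (the rewrite author's own statement) =====
-- stated objective: faster
-- what changed: Replaces the O(count) summation loop by the closed-form triangular-number formula price*count*(count+1)//2 and a max for the clamp.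
import Mathlib
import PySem

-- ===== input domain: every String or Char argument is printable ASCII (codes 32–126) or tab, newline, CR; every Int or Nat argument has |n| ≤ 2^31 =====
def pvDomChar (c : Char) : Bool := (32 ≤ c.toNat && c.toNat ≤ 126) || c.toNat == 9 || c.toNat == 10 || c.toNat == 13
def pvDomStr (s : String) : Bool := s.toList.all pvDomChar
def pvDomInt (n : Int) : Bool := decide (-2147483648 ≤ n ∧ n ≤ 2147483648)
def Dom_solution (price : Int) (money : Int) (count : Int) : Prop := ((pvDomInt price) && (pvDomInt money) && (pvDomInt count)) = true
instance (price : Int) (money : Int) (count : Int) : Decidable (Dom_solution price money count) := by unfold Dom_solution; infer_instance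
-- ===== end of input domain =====

-- B replaces A's O(count) summation loop by the closed-form triangular formula price*count*(count+1)//2 (O(1)).


-- ===== PORT A =====
-- for i in range(1, count+1): result += i * price; then clamp against money
def solution (price : Int) (money : Int) (count : Int) : Int :=
  let result := (PySem.List.pyRange 1 (count + 1) 1).foldl (fun r i => r + i * price) 0
  if result > money then result - money else 0

-- ===== PORT B =====
-- closed form: max(count,0) tickets, triangular number, clamp with max
def solution_alt (price : Int) (money : Int) (count : Int) : Int :=
  let n := max count 0
  let tickets := PySem.Int.floordiv (n * (n + 1)) 2
  max (price * tickets - money) 0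

-- ===== PRECONDITION & SPEC =====
def Spec_solution (price : Int) (money : Int) (count : Int) (out : Int) : Prop := out = solution_alt price money count
instance (price : Int) (money : Int) (count : Int) (out : Int) : Decidable (Spec_solution price money count out) := by unfold Spec_solution; infer_instance

-- ===== CLAIM (what is proved, stated in full; the proofs are below) =====
def Claim_equal_solution : Prop := ∀ (price : Int) (money : Int) (count : Int), Dom_solution price money count → Spec_solution price money count (solution price money count)

-- ===== LEMMAS AND PROOFS =====

-- triangular numbers, as the proofs' characterisation of A's loop
def tri : Nat → Nat
  | 0 => 0
  | n + 1 => tri n + (n + 1)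

theorem two_tri (n : Nat) : 2 * tri n = n * (n + 1) := by
  induction n with
  | zero => rfl
  | succ n ih => simp [tri]; ring_nf; ring_nf at ih; omega

theorem fold_tri (price : Int) (n : Nat) :
    (PySem.List.pyRange 1 ((n : Int) + 1) 1).foldl (fun r i => r + i * price) 0 = price * (tri n : Int) := by
  induction n with
  | zero => simp [PySem.List.pyRange_one_eq_nil, tri]
  | succ n ih =>
      rw [show ((n + 1 : Nat) : Int) + 1 = ((n : Int) + 1) + 1 by push_cast; ring,
        PySem.List.pyRange_one_succ_right (by omega)]
      simp [List.foldl_append, ih, tri]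
      ring

theorem floordiv_tri (n : Nat) :
    PySem.Int.floordiv ((n : Int) * ((n : Int) + 1)) 2 = (tri n : Int) := by
  rw [PySem.Int.floordiv_eq_ediv_of_pos (by norm_num)]
  have : (n : Int) * ((n : Int) + 1) = 2 * (tri n : Int) := by
    have h : ((2 * tri n : Nat) : Int) = ((n * (n + 1) : Nat) : Int) := by rw [two_tri]
    push_cast at h; linarith
  rw [this]
  omega

-- ===== VERDICT (by name: the statement is the Claim_ definition above) =====
theorem solution_spec : Claim_equal_solution := by
  intro price money count _
  unfold Spec_solution solution solution_alt
  by_cases hc : 0 ≤ count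
  · have hmax : max count 0 = count := by omega
    obtain ⟨n, rfl⟩ : ∃ n : Nat, count = (n : Int) := ⟨count.toNat, by omega⟩
    simp only [hmax, fold_tri, floordiv_tri]
    split_ifs with h <;> omega
  · have hnil : PySem.List.pyRange 1 (count + 1) 1 = [] :=
      PySem.List.pyRange_one_eq_nil (by omega)
    have hmax : max count 0 = 0 := by omega
    simp only [hnil, List.foldl_nil, hmax]
    norm_num [PySem.Int.floordiv]
    split_ifs with h <;> omega
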